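-- pv_equiv track=rewrite | github.com/unamark/Domaci | Treca nedelja/domaci3.py | ponavljajuca_sekvenca
-- ===== SOURCE A (Python) =====
-- def ponavljajuca_sekvenca(niz):
--     sub = []
--     proiz = 1
--     max_p = 1
--     m_sekv = []
--
--     for i in range(len(niz)):
--         for j in range(i + 1, len(niz)):
--             proiz = niz[i]
--             if niz[j] == niz[i]:
--                 sub = niz[i:j+1]
--                 proiz *= niz[j]
--                 if proiz > max_p:
--                     max_p = proiz
--                     m_sekv = sub
--     return m_sekv, max_p
-- ===== SOURCE B (Python) =====
-- def ponavljajuca_sekvenca(niz):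
--     # One pass: record the first and second occurrence index of each value
--     occ = {}  # value -> [first index, second index or None]
--     for j, v in enumerate(niz):
--         if v not in occ:
--             occ[v] = (j, None)
--         elif occ[v][1] is None:
--             occ[v] = (occ[v][0], j)
--     # Among repeated values with square > 1, pick the max square; among ties
--     # the lexicographically smallest (first, second) occurrence pair wins.
--     best = None  # (i, j, square)
--     for v, (i, j) in occ.items():
--         if j is None:
--             continue
--         sq = v * v
--         if sq <= 1:
--             continue
--         if best is None or sq > best[2] or (sq == best[2] and (i, j) < (best[0], best[1])):
--             best = (i, j, sq)
--     if best is None: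
--         return [], 1
--     return niz[best[0]:best[1] + 1], best[2]
-- ===== Notes on version B (the rewrite author's own statement) =====
-- stated objective: faster
-- what changed: A scans all O(n^2) index pairs (copying a slice for each equal pair); B makes one pass recording the first and second occurrence index of every value in a dict, then picks the largest square (smallest index pair on ties) among repeated values and slices once.
import Mathlib
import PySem

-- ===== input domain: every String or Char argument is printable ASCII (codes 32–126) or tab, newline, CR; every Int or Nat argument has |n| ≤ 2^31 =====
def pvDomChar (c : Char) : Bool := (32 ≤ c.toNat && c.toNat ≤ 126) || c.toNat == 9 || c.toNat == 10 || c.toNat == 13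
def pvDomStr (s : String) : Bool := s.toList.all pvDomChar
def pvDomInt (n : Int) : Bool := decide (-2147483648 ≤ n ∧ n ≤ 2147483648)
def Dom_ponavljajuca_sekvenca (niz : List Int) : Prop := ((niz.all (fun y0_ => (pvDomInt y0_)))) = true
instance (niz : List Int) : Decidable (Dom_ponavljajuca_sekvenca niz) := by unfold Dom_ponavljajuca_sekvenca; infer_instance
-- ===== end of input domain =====

-- B replaces A's quadratic pair scan by one pass that records the first and second
-- occurrence index of each value in a dict and then picks the best candidate (objective: faster).


-- ===== PORT A =====
-- literal transliteration of A: nested loops over index pairs (i, j), state (sub, proiz, max_p, m_sekv)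
def ponavljajuca_sekvenca (niz : List Int) : List Int × Int :=
  let n : Int := niz.length
  let st :=
    (PySem.List.pyRange 0 n 1).foldl (fun st i =>
      (PySem.List.pyRange (i + 1) n 1).foldl (fun st j =>
        let sub := st.1
        let proiz := PySem.List.pyGetD niz i 0      -- proiz = niz[i]  (index from range: always in range)
        let max_p := st.2.2.1
        let m_sekv := st.2.2.2
        if PySem.List.pyGetD niz j 0 = PySem.List.pyGetD niz i 0 then
          let sub := PySem.List.slice niz (some i) (some (j + 1))   -- sub = niz[i:j+1]
          let proiz := proiz * PySem.List.pyGetD niz j 0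
          if max_p < proiz then (sub, proiz, proiz, sub)
          else (sub, proiz, max_p, m_sekv)
        else (sub, proiz, max_p, m_sekv)) st)
      (([] : List Int), (1 : Int), (1 : Int), ([] : List Int))
  (st.2.2.2, st.2.2.1)

-- ===== PORT B =====
-- literal transliteration of B: one pass building occ : value -> (first index, second index or None),
-- then a scan of the dict items picking max square with lexicographically smallest index pair
def ponavljajuca_sekvenca_alt (niz : List Int) : List Int × Int :=
  let occ := (PySem.List.enumerate niz 0).foldl (fun d jv =>
      match d.get? jv.2 with
      | none => d.insert jv.2 (jv.1, (none : Option Int))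
      | some (i, none) => d.insert jv.2 (i, some jv.1)
      | some _ => d) PySem.Dict.empty
  let best := occ.items.foldl (fun best it =>
      match it.2.2 with
      | none => best
      | some j =>
        let sq := it.1 * it.1
        if sq ≤ 1 then best
        else
          match best with
          | none => some (it.2.1, j, sq)
          | some (bi, bj, bs) =>
            if bs < sq ∨ (sq = bs ∧ (it.2.1 < bi ∨ (it.2.1 = bi ∧ j < bj))) then
              some (it.2.1, j, sq)
            else best) (none : Option (Int × Int × Int))
  match best with
  | none => ([], 1)
  | some (i, j, sq) => (PySem.List.slice niz (some i) (some (j + 1)), sq)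

-- ===== PRECONDITION & SPEC =====
def Spec_ponavljajuca_sekvenca (niz : List Int) (out : List Int × Int) : Prop := out = ponavljajuca_sekvenca_alt niz
instance (niz : List Int) (out : List Int × Int) : Decidable (Spec_ponavljajuca_sekvenca niz out) := by unfold Spec_ponavljajuca_sekvenca; infer_instance

-- ===== CLAIM (what is proved, stated in full; the proofs are below) =====
def Claim_equal_ponavljajuca_sekvenca : Prop := ∀ (niz : List Int), Dom_ponavljajuca_sekvenca niz → Spec_ponavljajuca_sekvenca niz (ponavljajuca_sekvenca niz)

-- ===== LEMMAS AND PROOFS =====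

-- ---- proof-side vocabulary ----

-- the strict-improvement update A performs on (max_p, m_sekv) for a candidate (product, slice)
def upd (s c : Int × List Int) : Int × List Int := if s.1 < c.1 then c else s
def updO (s : Int × List Int) : Option (Int × List Int) → Int × List Int
  | none => s
  | some c => upd s c

-- first index j with a ≤ j < a + m and niz[j] = v
def wfind (niz : List Int) (v : Int) : Nat → Nat → Option Nat
  | _, 0 => none
  | a, m + 1 => if niz.getD a 0 = v then some a else wfind niz v (a + 1) m

-- the candidate pair contributed by outer index k: (niz[k]^2, niz[k:j+1]) for the first j > k with niz[j] = niz[k]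
def cand (niz : List Int) (k : Nat) : Option (Int × List Int) :=
  (wfind niz (niz.getD k 0) (k + 1) (niz.length - (k + 1))).map
    (fun j => (niz.getD k 0 * niz.getD k 0, (niz.drop k).take (j + 1 - k)))

-- k is the first occurrence of its value
def firstOcc (niz : List Int) (k : Nat) : Bool := !(niz.take k).contains (niz.getD k 0)

-- second occurrence bookkeeping matching the dict contents over a prefix p
def e2 (p : List Int) (k : Nat) : Option Nat :=
  (PySem.List.index? (p.drop (k + 1)) (p.getD k 0)).map (fun t => k + 1 + t)

-- the common core both ports are reduced to
def core (niz : List Int) : Int × List Int :=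
  ((List.range niz.length).filter (firstOcc niz)).foldl (fun p k => updO p (cand niz k)) (1, [])

-- ---- generic facts about upd ----

theorem updO_fst_le (s : Int × List Int) (c : Option (Int × List Int)) : s.1 ≤ (updO s c).1 := by
  cases c with
  | none => simp [updO]
  | some c => simp only [updO, upd]; split <;> omega

theorem updO_fst_ge (s : Int × List Int) (c : Int × List Int) : c.1 ≤ (updO s (some c)).1 := by
  simp only [updO, upd]; split <;> omega

theorem updO_noop (s c : Int × List Int) (h : c.1 ≤ s.1) : updO s (some c) = s := by
  simp only [updO, upd]; rw [if_neg (not_lt.mpr h)]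

theorem updO_take (s c : Int × List Int) (h : s.1 < c.1) : updO s (some c) = c := by
  simp only [updO, upd]; rw [if_pos h]

-- ---- A-side ----

-- the body of A's inner loop, over a Nat index j (i = ↑k fixed)
def innerStep (niz : List Int) (k : Nat) (st : List Int × Int × Int × List Int) (j : Nat) :
    List Int × Int × Int × List Int :=
  let sub := st.1
  let proiz := niz.getD k 0
  let max_p := st.2.2.1
  let m_sekv := st.2.2.2
  if niz.getD j 0 = niz.getD k 0 then
    let sub := (niz.drop k).take (j + 1 - k)
    let proiz := proiz * niz.getD j 0
    if max_p < proiz then (sub, proiz, proiz, sub)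
    else (sub, proiz, max_p, m_sekv)
  else (sub, proiz, max_p, m_sekv)

def proj (st : List Int × Int × Int × List Int) : Int × List Int := (st.2.2.1, st.2.2.2)

theorem inner_absorb (niz : List Int) (k : Nat) :
    ∀ (m a : Nat) (st : List Int × Int × Int × List Int),
      niz.getD k 0 * niz.getD k 0 ≤ st.2.2.1 →
      proj ((List.range' a m).foldl (innerStep niz k) st) = proj st := by
  intro m
  induction m with
  | zero => intro a st _; simp
  | succ m ih =>
    intro a st h
    rw [List.range'_succ, List.foldl_cons]
    have hpres : proj (innerStep niz k st a) = proj st ∧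
        niz.getD k 0 * niz.getD k 0 ≤ (innerStep niz k st a).2.2.1 := by
      simp only [innerStep, proj]
      by_cases heq : niz.getD a 0 = niz.getD k 0
      · rw [if_pos heq, heq, if_neg (not_lt.mpr h)]
        exact ⟨rfl, h⟩
      · rw [if_neg heq]
        exact ⟨rfl, h⟩
    rw [ih (a + 1) _ hpres.2, hpres.1]

theorem inner_eq (niz : List Int) (k : Nat) :
    ∀ (m a : Nat) (st : List Int × Int × Int × List Int),
      proj ((List.range' a m).foldl (innerStep niz k) st) =
        updO (proj st) ((wfind niz (niz.getD k 0) a m).map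
          (fun j => (niz.getD k 0 * niz.getD k 0, (niz.drop k).take (j + 1 - k)))) := by
  intro m
  induction m with
  | zero => intro a st; simp [wfind, updO]
  | succ m ih =>
    intro a st
    rw [List.range'_succ, List.foldl_cons]
    by_cases heq : niz.getD a 0 = niz.getD k 0
    · have hst : innerStep niz k st a =
          ((niz.drop k).take (a + 1 - k), niz.getD k 0 * niz.getD k 0,
            updO (proj st) (some (niz.getD k 0 * niz.getD k 0, (niz.drop k).take (a + 1 - k)))) := by
        simp only [innerStep, proj, updO, upd]
        rw [if_pos heq, heq]
        split <;> rfl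
      rw [inner_absorb niz k m (a + 1) _ (by rw [hst]; exact updO_fst_ge _ _), hst]
      simp only [wfind, if_pos heq, proj, Option.map_some]
    · rw [ih (a + 1)]
      have hpr : proj (innerStep niz k st a) = proj st := by
        simp only [innerStep, proj]; rw [if_neg heq]
      rw [hpr]
      simp only [wfind, if_neg heq]

-- the two loop bodies of A's port, named (definitionally equal to the port's lambdas)
def stepAJ (niz : List Int) (i : Int) (st : List Int × Int × Int × List Int) (j : Int) :
    List Int × Int × Int × List Int :=
  let sub := st.1
  let proiz := PySem.List.pyGetD niz i 0
  let max_p := st.2.2.1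
  let m_sekv := st.2.2.2
  if PySem.List.pyGetD niz j 0 = PySem.List.pyGetD niz i 0 then
    let sub := PySem.List.slice niz (some i) (some (j + 1))
    let proiz := proiz * PySem.List.pyGetD niz j 0
    if max_p < proiz then (sub, proiz, proiz, sub)
    else (sub, proiz, max_p, m_sekv)
  else (sub, proiz, max_p, m_sekv)

def stepAI (niz : List Int) (st : List Int × Int × Int × List Int) (i : Int) :
    List Int × Int × Int × List Int :=
  (PySem.List.pyRange (i + 1) (niz.length : Int) 1).foldl (stepAJ niz i) st

theorem stepAJ_cast (niz : List Int) (k j : Nat) (st : List Int × Int × Int × List Int) :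
    stepAJ niz (k : Int) st (j : Int) = innerStep niz k st j := by
  simp only [stepAJ, innerStep, PySem.List.pyGetD_natCast]
  have h1 : ((j : Int) + 1) = ((j + 1 : Nat) : Int) := by push_cast; ring
  rw [h1, PySem.List.slice_natCast]

theorem stepAI_cast (niz : List Int) (k : Nat) (st : List Int × Int × Int × List Int) :
    stepAI niz st (k : Int) =
      (List.range' (k + 1) (niz.length - (k + 1))).foldl (innerStep niz k) st := by
  unfold stepAI
  rw [PySem.List.pyRange_one, List.foldl_map]
  have hm : ((niz.length : Int) - ((k : Int) + 1)).toNat = niz.length - (k + 1) := by omega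
  rw [hm, List.range'_eq_map_range, List.foldl_map]
  apply List.foldl_ext
  intro st t _
  have h1 : ((k : Int) + 1 + (t : Int)) = ((k + 1 + t : Nat) : Int) := by push_cast; ring
  rw [h1, stepAJ_cast]

theorem foldl_proj (niz : List Int) :
    ∀ (l : List Nat) (st : List Int × Int × Int × List Int),
      proj (l.foldl (fun st (k : Nat) => stepAI niz st (k : Int)) st) =
        l.foldl (fun p k => updO p (cand niz k)) (proj st) := by
  intro l
  induction l with
  | nil => intro st; rfl
  | cons k l ih =>
    intro st
    rw [List.foldl_cons, List.foldl_cons, ih]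
    congr 1
    rw [stepAI_cast, inner_eq]
    rfl

-- A's port equals the fold of updO ∘ cand over all outer indices
theorem portA_eq (niz : List Int) :
    ponavljajuca_sekvenca niz =
      (fun p => (p.2, p.1))
        ((List.range niz.length).foldl (fun p k => updO p (cand niz k)) (1, [])) := by
  show (fun st : List Int × Int × Int × List Int => (st.2.2.2, st.2.2.1))
      ((PySem.List.pyRange 0 (niz.length : Int) 1).foldl (stepAI niz) ([], 1, 1, [])) = _
  rw [PySem.List.pyRange_zero_natCast, List.foldl_map]
  have h := foldl_proj niz (List.range niz.length) ([], 1, 1, [])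
  simp only [proj, Prod.ext_iff] at h
  exact Prod.ext h.2 h.1

theorem wfind_isSome (niz : List Int) (v : Int) :
    ∀ (m a j : Nat), a ≤ j → j < a + m → niz.getD j 0 = v → (wfind niz v a m).isSome := by
  intro m
  induction m with
  | zero => intro a j h1 h2 _; omega
  | succ m ih =>
    intro a j h1 h2 hv
    by_cases ha : niz.getD a 0 = v
    · simp only [wfind, if_pos ha, Option.isSome_some]
    · have hja : j ≠ a := by rintro rfl; exact ha hv
      simp only [wfind, if_neg ha]
      exact ih (a + 1) j (by omega) (by omega) hv

theorem mem_take_getD (niz : List Int) (a : Nat) (v : Int) (h : v ∈ niz.take a) :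
    ∃ k0, k0 < a ∧ niz.getD k0 0 = v := by
  obtain ⟨k0, hk0, hv⟩ := List.getElem_of_mem h
  have hk0' : k0 < a ∧ k0 < niz.length := by simp [List.length_take] at hk0; omega
  refine ⟨k0, hk0'.1, ?_⟩
  rw [List.getElem_take] at hv
  rw [List.getD_eq_getElem?_getD, List.getElem?_eq_getElem hk0'.2, Option.getD_some, hv]

-- the first component of a candidate, if any, is the square of the value at its index
theorem cand_fst (niz : List Int) (k : Nat) (c : Int × List Int) (h : cand niz k = some c) :
    c.1 = niz.getD k 0 * niz.getD k 0 := by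
  unfold cand at h
  cases hw : wfind niz (niz.getD k 0) (k + 1) (niz.length - (k + 1)) with
  | none => rw [hw] at h; simp at h
  | some j =>
    rw [hw] at h
    simp only [Option.map_some, Option.some.injEq] at h
    rw [← h]

-- dropping non-first-occurrence outer indices does not change the fold
theorem filter_first (niz : List Int) :
    ∀ (m a : Nat) (mp : Int) (ms : List Int), a + m = niz.length →
      (∀ k j : Nat, k < a → k < j → j < niz.length → niz.getD k 0 = niz.getD j 0 →
        niz.getD k 0 * niz.getD k 0 ≤ mp) →
      (List.range' a m).foldl (fun p k => updO p (cand niz k)) (mp, ms) =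
        (List.range' a m).foldl
          (fun p k => if firstOcc niz k then updO p (cand niz k) else p) (mp, ms) := by
  intro m
  induction m with
  | zero => intro a mp ms _ _; rfl
  | succ m ih =>
    intro a mp ms hlen H
    rw [List.range'_succ, List.foldl_cons, List.foldl_cons]
    by_cases hf : firstOcc niz a = true
    · rw [if_pos hf]
      rcases hc : updO (mp, ms) (cand niz a) with ⟨mp', ms'⟩
      apply ih (a + 1) mp' ms' (by omega)
      intro k j hk hkj hj hv
      by_cases hka : k < a
      · calc niz.getD k 0 * niz.getD k 0 ≤ mp := H k j hka hkj hj hv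
          _ ≤ mp' := by have := updO_fst_le (mp, ms) (cand niz a); rw [hc] at this; exact this
      · have hkeq : k = a := by omega
        subst hkeq
        have hsome := wfind_isSome niz (niz.getD k 0) (niz.length - (k + 1)) (k + 1) j
          (by omega) (by omega) hv.symm
        cases hw : wfind niz (niz.getD k 0) (k + 1) (niz.length - (k + 1)) with
        | none => rw [hw] at hsome; simp at hsome
        | some j0 =>
          have hcand : cand niz k =
              some (niz.getD k 0 * niz.getD k 0, (niz.drop k).take (j0 + 1 - k)) := by
            unfold cand; rw [hw]; rfl
          have := updO_fst_ge (mp, ms) (niz.getD k 0 * niz.getD k 0, (niz.drop k).take (j0 + 1 - k))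
          rw [← hcand, hc] at this
          exact this
    · rw [if_neg hf]
      have hv : niz.getD a 0 ∈ niz.take a := by
        unfold firstOcc at hf
        simp at hf
        exact hf
      obtain ⟨k0, hk0a, hk0v⟩ := mem_take_getD niz a (niz.getD a 0) hv
      have hle : niz.getD a 0 * niz.getD a 0 ≤ mp := by
        have := H k0 a hk0a hk0a (by omega) (by rw [hk0v])
        rw [hk0v] at this
        exact this
      have hnoop : updO (mp, ms) (cand niz a) = (mp, ms) := by
        cases hc : cand niz a with
        | none => rfl
        | some c =>
          have hcf := cand_fst niz a c hc
          simp only [updO, upd]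
          rw [if_neg (by rw [hcf]; omega)]
      rw [hnoop]
      apply ih (a + 1) mp ms (by omega)
      intro k j hk hkj hj hveq
      by_cases hka : k < a
      · exact H k j hka hkj hj hveq
      · have hkeq : k = a := by omega
        subst hkeq
        exact hle

theorem A_eq_core (niz : List Int) :
    ponavljajuca_sekvenca niz = ((core niz).2, (core niz).1) := by
  rw [portA_eq]
  unfold core
  rw [← PySem.List.foldl_if_eq_foldl_filter (firstOcc niz)
    (fun p k => updO p (cand niz k)) (List.range niz.length) (1, [])]
  rw [List.range_eq_range',
    filter_first niz niz.length 0 1 [] (by omega) (by intro k j hk ; omega)]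

-- ---- B-side ----

-- the dict built by B's first loop over the prefix p
def occDict (p : List Int) : PySem.Dict Int (Int × Option Int) :=
  (PySem.List.enumerate p 0).foldl (fun d jv =>
      match d.get? jv.2 with
      | none => d.insert jv.2 (jv.1, (none : Option Int))
      | some (i, none) => d.insert jv.2 (i, some jv.1)
      | some _ => d) PySem.Dict.empty

-- characterisation of the dict items: one entry per first occurrence, in index order
def itemsSpec (p : List Int) : List (Int × Int × Option Int) :=
  ((List.range p.length).filter (firstOcc p)).map
    (fun k => (p.getD k 0, ((k : Int), (e2 p k).map (fun t : Nat => (t : Int)))))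

theorem index?_append_singleton (l : List Int) (x v : Int) :
    PySem.List.index? (l ++ [x]) v =
      if v ∈ l then PySem.List.index? l v
      else if x = v then some l.length else none := by
  induction l with
  | nil =>
    simp only [List.nil_append, List.not_mem_nil, if_false, List.length_nil]
    by_cases hx : x = v
    · subst hx; rw [if_pos rfl, PySem.List.index?_cons_self]
    · rw [if_neg hx, PySem.List.index?_cons_of_ne _ hx]
      simp [PySem.List.index?]
  | cons y l ih =>
    by_cases hy : y = v
    · subst hy
      rw [List.cons_append, PySem.List.index?_cons_self,
        if_pos (List.mem_cons_self (a := y) (l := l)), PySem.List.index?_cons_self]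
    · have hvy : v ∈ y :: l ↔ v ∈ l := by
        constructor
        · intro h
          rcases List.mem_cons.mp h with h | h
          · exact absurd h.symm hy
          · exact h
        · intro h; exact List.mem_cons_of_mem _ h
      rw [List.cons_append, PySem.List.index?_cons_of_ne _ hy, ih,
          PySem.List.index?_cons_of_ne _ hy]
      by_cases hvl : v ∈ l
      · rw [if_pos hvl, if_pos (hvy.mpr hvl)]
      · rw [if_neg hvl, if_neg (fun h => hvl (hvy.mp h))]
        by_cases hx : x = v
        · rw [if_pos hx, if_pos hx]; simp
        · rw [if_neg hx, if_neg hx]; rfl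

theorem firstOcc_append (p : List Int) (x : Int) (k : Nat) (hk : k < p.length) :
    firstOcc (p ++ [x]) k = firstOcc p k := by
  unfold firstOcc
  rw [List.getD_append p [x] 0 k hk, List.take_append_of_le_length (le_of_lt hk)]

theorem firstOcc_append_last (p : List Int) (x : Int) :
    firstOcc (p ++ [x]) p.length = !p.contains x := by
  unfold firstOcc
  simp

theorem e2_append (p : List Int) (x : Int) (k : Nat) (hk : k < p.length) :
    e2 (p ++ [x]) k =
      if p.getD k 0 = x ∧ e2 p k = none then some p.length else e2 p k := by
  have hgd : (p ++ [x]).getD k 0 = p.getD k 0 := List.getD_append p [x] 0 k hk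
  have hdr : (p ++ [x]).drop (k + 1) = p.drop (k + 1) ++ [x] :=
    List.drop_append_of_le_length (by omega)
  unfold e2
  rw [hgd, hdr, index?_append_singleton]
  cases hidx : PySem.List.index? (p.drop (k + 1)) (p.getD k 0) with
  | some t =>
    have hmem : p.getD k 0 ∈ p.drop (k + 1) := by
      rw [← PySem.List.index?_isSome_iff (xs := p.drop (k + 1)) (v := p.getD k 0), hidx]
      rfl
    rw [if_pos hmem]
    simp
  | none =>
    have hmem : p.getD k 0 ∉ p.drop (k + 1) := (PySem.List.index?_eq_none_iff _ _).mp hidx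
    rw [if_neg hmem]
    by_cases hx : x = p.getD k 0
    · rw [if_pos hx, if_pos ⟨hx.symm, by simp⟩]
      simp only [Option.map_some, List.length_drop]
      congr 1
      omega
    · rw [if_neg hx, if_neg (fun h => hx h.1.symm)]

-- values at distinct first-occurrence indices are distinct
theorem firstOcc_ne (p : List Int) (k1 k2 : Nat) (hlt : k1 < k2)
    (hk2 : k2 ∈ (List.range p.length).filter (firstOcc p)) :
    p.getD k1 0 ≠ p.getD k2 0 := by
  intro heq
  have hk2' := List.mem_filter.mp hk2
  have hk2len : k2 < p.length := List.mem_range.mp hk2'.1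
  have hk1len : k1 < p.length := by omega
  have hmem : p.getD k2 0 ∈ p.take k2 := by
    rw [← heq, List.getD_eq_getElem p 0 hk1len]
    have h : (p.take k2)[k1]'(by simp; omega) ∈ p.take k2 := List.getElem_mem _
    rw [List.getElem_take] at h
    exact h
  have hf := hk2'.2
  unfold firstOcc at hf
  simp only [Bool.not_eq_true', List.contains_eq_mem, decide_eq_false_iff_not] at hf
  exact hf hmem

theorem firstOcc_inj (p : List Int) (k1 k2 : Nat)
    (h1 : k1 ∈ (List.range p.length).filter (firstOcc p))
    (h2 : k2 ∈ (List.range p.length).filter (firstOcc p))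
    (heq : p.getD k1 0 = p.getD k2 0) : k1 = k2 := by
  rcases lt_trichotomy k1 k2 with h | h | h
  · exact absurd heq (firstOcc_ne p k1 k2 h h2)
  · exact h
  · exact absurd heq.symm (firstOcc_ne p k2 k1 h h1)

theorem itemsSpec_keys_nodup (p : List Int) : ((itemsSpec p).map Prod.fst).Nodup := by
  unfold itemsSpec
  rw [List.map_map]
  apply List.Nodup.map_on
  · intro k1 h1 k2 h2 heq
    simp only [Function.comp_apply] at heq
    exact firstOcc_inj p k1 k2 h1 h2 heq
  · exact List.Nodup.filter _ List.nodup_range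

-- how the characterised items evolve when one element is appended
theorem itemsSpec_append (p : List Int) (x : Int) :
    itemsSpec (p ++ [x]) =
      ((List.range p.length).filter (firstOcc p)).map
        (fun k => ((p.getD k 0 : Int), ((k : Int),
          if p.getD k 0 = x ∧ e2 p k = none then some (p.length : Int)
          else (e2 p k).map (fun t : Nat => (t : Int))))) ++
      (if p.contains x then [] else [(x, ((p.length : Int), (none : Option Int)))]) := by
  unfold itemsSpec
  have hlen : (p ++ [x]).length = p.length + 1 := by simp
  rw [hlen, List.range_succ, List.filter_append, List.map_append]
  congr 1
  · rw [List.filter_congr (fun k hk => by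
      rw [firstOcc_append p x k (List.mem_range.mp hk)])]
    apply List.map_congr_left
    intro k hk
    have hk' := List.mem_filter.mp hk
    have hklen : k < p.length := List.mem_range.mp hk'.1
    rw [List.getD_append p [x] 0 k hklen, e2_append p x k hklen]
    by_cases hc : p.getD k 0 = x ∧ e2 p k = none
    · rw [if_pos hc, if_pos hc]
      rcases hc with ⟨-, h2⟩
      simp
    · rw [if_neg hc, if_neg hc]
  · have hfl : List.filter (firstOcc (p ++ [x])) [p.length] =
        if p.contains x then [] else [p.length] := by
      have : List.filter (firstOcc (p ++ [x])) [p.length] =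
          if firstOcc (p ++ [x]) p.length then [p.length] else [] := by
        simp only [List.filter]
        cases firstOcc (p ++ [x]) p.length <;> rfl
      rw [this, firstOcc_append_last]
      cases p.contains x <;> rfl
    rw [hfl]
    by_cases hcx : p.contains x
    · rw [if_pos hcx, if_pos hcx]
      rfl
    · rw [if_neg hcx, if_neg hcx, List.map_singleton]
      have hgd : (p ++ [x]).getD p.length 0 = x := by simp
      have he2 : e2 (p ++ [x]) p.length = none := by
        unfold e2
        have hd : (p ++ [x]).drop (p.length + 1) = [] := by simp
        rw [hd]
        simp [PySem.List.index?]
      rw [hgd, he2]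
      rfl

-- itemsSpec really lists the entries of p, so its keys are members of p
theorem mem_keys_itemsSpec (p : List Int) (x : Int)
    (h : x ∈ (itemsSpec p).map Prod.fst) : x ∈ p := by
  unfold itemsSpec at h
  rw [List.map_map] at h
  obtain ⟨k, hk, hv⟩ := List.mem_map.mp h
  have hklen : k < p.length := List.mem_range.mp (List.mem_filter.mp hk).1
  simp only [Function.comp_apply] at hv
  rw [← hv, List.getD_eq_getElem p 0 hklen]
  exact List.getElem_mem hklen

-- the first occurrence index of x ∈ p, with its properties
theorem exists_firstOcc (p : List Int) (x : Int) (hx : x ∈ p) :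
    ∃ k0, k0 ∈ (List.range p.length).filter (firstOcc p) ∧ p.getD k0 0 = x := by
  have hsome : (PySem.List.index? p x).isSome := (PySem.List.index?_isSome_iff p x).mpr hx
  cases hidx : PySem.List.index? p x with
  | none => rw [hidx] at hsome; simp at hsome
  | some k0 =>
    obtain ⟨hk0len, hval, hbefore⟩ := PySem.List.getElem_of_index?_eq_some hidx
    refine ⟨k0, List.mem_filter.mpr ⟨List.mem_range.mpr hk0len, ?_⟩,
      by rw [List.getD_eq_getElem p 0 hk0len, hval]⟩
    unfold firstOcc
    simp only [Bool.not_eq_eq_eq_not, Bool.not_true, List.contains_eq_mem,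
      decide_eq_false_iff_not]
    intro hmem
    obtain ⟨j, hj, hjv⟩ := mem_take_getD p k0 _ hmem
    rw [List.getD_eq_getElem p 0 hk0len, hval] at hjv
    have hjlen : j < p.length := by omega
    rw [List.getD_eq_getElem p 0 hjlen] at hjv
    exact hbefore j hj hjv

theorem occDict_keys_nodup (p : List Int) (h : (occDict p).items = itemsSpec p) :
    (occDict p).keys.Nodup := by
  show ((occDict p).items.map Prod.fst).Nodup
  rw [h]
  exact itemsSpec_keys_nodup p

theorem occDict_items (p : List Int) : (occDict p).items = itemsSpec p := by
  induction p using List.reverseRecOn with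
  | nil => rfl
  | append_singleton p x ih =>
    have hstep : occDict (p ++ [x]) =
        (match (occDict p).get? x with
         | none => (occDict p).insert x ((p.length : Int), (none : Option Int))
         | some (i, none) => (occDict p).insert x (i, some (p.length : Int))
         | some _ => occDict p) := by
      unfold occDict
      rw [PySem.List.enumerate_append, List.foldl_append]
      simp [PySem.List.enumerate]
    rw [hstep, itemsSpec_append]
    by_cases hx : x ∈ p
    · -- x seen before: its first-occurrence entry is in the dict
      obtain ⟨k0, hk0, hk0v⟩ := exists_firstOcc p x hx
      have hmemit : (x, ((k0 : Int), (e2 p k0).map (fun t : Nat => (t : Int)))) ∈ (occDict p).items := by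
        rw [ih]
        unfold itemsSpec
        exact List.mem_map.mpr ⟨k0, hk0, by rw [hk0v]⟩
      have hget : (occDict p).get? x = some ((k0 : Int), (e2 p k0).map (fun t : Nat => (t : Int))) :=
        PySem.Dict.get?_of_mem_items _ hmemit (occDict_keys_nodup p ih)
      have hcont : p.contains x = true := by
        rw [List.contains_eq_mem, decide_eq_true_eq]
        exact hx
      rw [if_pos hcont, List.append_nil]
      cases he2 : e2 p k0 with
      | none =>
        -- second occurrence recorded now: the dict entry for x is overwritten
        rw [hget, he2]
        show ((occDict p).insert x ((k0 : Int), some (p.length : Int))).items = _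
        rw [PySem.Dict.items_insert_of_contains _ _
          (by rw [PySem.Dict.contains_eq_isSome_get?, hget]; rfl)]
        rw [ih]
        unfold itemsSpec
        rw [List.map_map]
        apply List.map_congr_left
        intro k hk
        simp only [Function.comp_apply]
        simp only [beq_iff_eq]
        by_cases hkx : p.getD k 0 = x
        · have hkk0 : k = k0 := firstOcc_inj p k k0 hk hk0 (by rw [hkx, hk0v])
          subst hkk0
          rw [if_pos hkx, if_pos ⟨hkx, he2⟩, hkx]
        · rw [if_neg hkx, if_neg (fun h => hkx h.1)]
      | some j =>
        -- first and second occurrence both known: the dict is unchanged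
        rw [hget, he2]
        show (occDict p).items = _
        rw [ih]
        unfold itemsSpec
        apply List.map_congr_left
        intro k hk
        by_cases hkx : p.getD k 0 = x
        · have hkk0 : k = k0 := firstOcc_inj p k k0 hk hk0 (by rw [hkx, hk0v])
          subst hkk0
          rw [if_neg (by rintro ⟨-, h⟩; rw [he2] at h; cases h)]
        · rw [if_neg (fun h => hkx h.1)]
    · -- x is new: a fresh entry is appended
      have hget : (occDict p).get? x = none := by
        rw [PySem.Dict.get?_eq_none_iff_not_mem_keys]
        intro hmem
        exact hx (mem_keys_itemsSpec p x (by rw [← ih]; exact hmem))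
      rw [hget]
      show ((occDict p).insert x ((p.length : Int), (none : Option Int))).items = _
      rw [PySem.Dict.items_insert_of_not_contains _ _
        (by rw [PySem.Dict.contains_eq_isSome_get?, hget]; rfl)]
      have hcont : p.contains x = false := by
        rw [List.contains_eq_mem, decide_eq_false_iff_not]
        exact hx
      rw [if_neg (by rw [hcont]; exact Bool.false_ne_true), ih]
      congr 1
      unfold itemsSpec
      apply List.map_congr_left
      intro k hk
      have hklen : k < p.length := List.mem_range.mp (List.mem_filter.mp hk).1
      have hkx : p.getD k 0 ≠ x := by
        intro h
        apply hx
        rw [← h, List.getD_eq_getElem p 0 hklen]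
        exact List.getElem_mem hklen
      rw [if_neg (fun h => hkx h.1)]

-- B's selection-loop body, named (definitionally equal to the port's lambda)
def stepB (best : Option (Int × Int × Int)) (it : Int × Int × Option Int) :
    Option (Int × Int × Int) :=
  match it.2.2 with
  | none => best
  | some j =>
    let sq := it.1 * it.1
    if sq ≤ 1 then best
    else
      match best with
      | none => some (it.2.1, j, sq)
      | some (bi, bj, bs) =>
        if bs < sq ∨ (sq = bs ∧ (it.2.1 < bi ∨ (it.2.1 = bi ∧ j < bj))) then
          some (it.2.1, j, sq)
        else best

def entryOf (niz : List Int) (k : Nat) : Int × Int × Option Int :=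
  (niz.getD k 0, ((k : Int), (e2 niz k).map (fun t : Nat => (t : Int))))

theorem wfind_eq_index? (niz : List Int) (v : Int) :
    ∀ (m a : Nat), a + m = niz.length →
      wfind niz v a m = (PySem.List.index? (niz.drop a) v).map (fun t => a + t) := by
  intro m
  induction m with
  | zero =>
    intro a ha
    have ha' : a = niz.length := by omega
    subst ha'
    simp [wfind, PySem.List.index?]
  | succ m ih =>
    intro a ha
    have halen : a < niz.length := by omega
    rw [List.drop_eq_getElem_cons halen]
    by_cases heq : niz.getD a 0 = v
    · have hv : niz[a] = v := by rw [← List.getD_eq_getElem niz 0 halen]; exact heq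
      rw [hv, PySem.List.index?_cons_self]
      simp only [wfind, if_pos heq, Option.map_some, Nat.add_zero]
    · have hv : niz[a] ≠ v := by rw [← List.getD_eq_getElem niz 0 halen]; exact heq
      rw [PySem.List.index?_cons_of_ne _ hv]
      simp only [wfind, if_neg heq]
      rw [ih (a + 1) (by omega), Option.map_map]
      congr 1
      funext t
      simp only [Function.comp_apply]
      omega

theorem cand_eq_e2 (niz : List Int) (k : Nat) (hk : k < niz.length) :
    cand niz k = (e2 niz k).map
      (fun j => (niz.getD k 0 * niz.getD k 0, (niz.drop k).take (j + 1 - k))) := by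
  unfold cand e2
  rw [wfind_eq_index? niz (niz.getD k 0) (niz.length - (k + 1)) (k + 1) (by omega),
    Option.map_map]

-- the relation maintained between B's selection state and the core fold state
def BRel (niz : List Int) (best : Option (Int × Int × Int)) (p : Int × List Int)
    (l : List Nat) : Prop :=
  (best = none ∧ p = (1, [])) ∨
  (∃ k0 j0 : Nat, best = some ((k0 : Int), (j0 : Int), p.1) ∧
    p.2 = (niz.drop k0).take (j0 + 1 - k0) ∧ 1 < p.1 ∧ ∀ k ∈ l, k0 < k)

theorem selB (niz : List Int) :
    ∀ (l : List Nat) (best : Option (Int × Int × Int)) (p : Int × List Int),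
      (∀ k ∈ l, k < niz.length) → l.Pairwise (· < ·) → BRel niz best p l →
      BRel niz (l.foldl (fun b k => stepB b (entryOf niz k)) best)
        (l.foldl (fun p k => updO p (cand niz k)) p) [] := by
  intro l
  induction l with
  | nil => intro best p _ _ h; exact h
  | cons k rest ih =>
    intro best p hlen hpw hrel
    rw [List.foldl_cons, List.foldl_cons]
    have hklen : k < niz.length := hlen k List.mem_cons_self
    have hcand := cand_eq_e2 niz k hklen
    apply ih _ _ (fun k' hk' => hlen k' (List.mem_cons_of_mem _ hk'))
      (List.Pairwise.sublist (List.sublist_cons_self k rest) hpw)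
    cases he2 : e2 niz k with
    | none =>
      have hb : stepB best (entryOf niz k) = best := by
        unfold stepB entryOf
        rw [he2]
        rfl
      have hp : updO p (cand niz k) = p := by rw [hcand, he2]; rfl
      rw [hb, hp]
      rcases hrel with h | ⟨k0, j0, h1, h2, h3, h4⟩
      · exact Or.inl h
      · exact Or.inr ⟨k0, j0, h1, h2, h3, fun k' hk' => h4 k' (List.mem_cons_of_mem _ hk')⟩
    | some j0' =>
      have hcand' : cand niz k =
          some (niz.getD k 0 * niz.getD k 0, (niz.drop k).take (j0' + 1 - k)) := by
        rw [hcand, he2]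
        rfl
      set sq := niz.getD k 0 * niz.getD k 0 with hsq
      rcases hrel with ⟨hb, hp⟩ | ⟨k0, j0, h1, h2, h3, h4⟩
      · -- no candidate yet: p = (1, [])
        subst hb; subst hp
        have hbB : stepB none (entryOf niz k) =
            if sq ≤ 1 then none else some ((k : Int), (j0' : Int), sq) := by
          unfold stepB entryOf
          rw [he2]
          simp only [Option.map_some]
          rfl
        by_cases hle : sq ≤ 1
        · rw [hbB, if_pos hle, hcand']
          have hup := updO_noop (1, ([] : List Int)) (sq, (niz.drop k).take (j0' + 1 - k))
            (by show sq ≤ (1 : Int); omega)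
          rw [hup]
          exact Or.inl ⟨rfl, rfl⟩
        · rw [hbB, if_neg hle, hcand']
          have hup := updO_take (1, ([] : List Int)) (sq, (niz.drop k).take (j0' + 1 - k))
            (by show (1 : Int) < sq; omega)
          rw [hup]
          exact Or.inr ⟨k, j0', rfl, rfl, by omega,
            fun k' hk' => (List.pairwise_cons.mp hpw).1 k' hk'⟩
      · -- a candidate (k0, j0, p.1) is held; k0 < k kills B's tie-break
        have hk0k : k0 < k := h4 k List.mem_cons_self
        have hbB : stepB (some ((k0 : Int), (j0 : Int), p.1)) (entryOf niz k) =
            if sq ≤ 1 then some ((k0 : Int), (j0 : Int), p.1)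
            else
              if p.1 < sq ∨ (sq = p.1 ∧ ((k : Int) < (k0 : Int) ∨ ((k : Int) = (k0 : Int) ∧ (j0' : Int) < (j0 : Int)))) then
                some ((k : Int), (j0' : Int), sq)
              else some ((k0 : Int), (j0 : Int), p.1) := by
          unfold stepB entryOf
          rw [he2]
          simp only [Option.map_some]
          rfl
        have hnotlt : ¬ ((k : Int) < (k0 : Int) ∨ ((k : Int) = (k0 : Int) ∧ (j0' : Int) < (j0 : Int))) := by
          push Not
          constructor
          · exact_mod_cast Nat.le_of_lt hk0k
          · intro h
            exact absurd (by exact_mod_cast h : k = k0) (by omega)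
        rw [h1]
        by_cases hle : sq ≤ 1
        · rw [hbB, if_pos hle, hcand']
          have hup := updO_noop p (sq, (niz.drop k).take (j0' + 1 - k))
            (by show sq ≤ p.1; omega)
          rw [hup]
          exact Or.inr ⟨k0, j0, rfl, h2, h3, fun k' hk' => h4 k' (List.mem_cons_of_mem _ hk')⟩
        · rw [hbB, if_neg hle, hcand']
          by_cases himp : p.1 < sq
          · rw [if_pos (Or.inl himp)]
            have hup := updO_take p (sq, (niz.drop k).take (j0' + 1 - k))
              (by show p.1 < sq; exact himp)
            rw [hup]
            exact Or.inr ⟨k, j0', rfl, rfl, by omega,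
              fun k' hk' => (List.pairwise_cons.mp hpw).1 k' hk'⟩
          · rw [if_neg (by
              rintro (h | ⟨hsqe, habs⟩)
              · exact himp h
              · exact hnotlt habs)]
            have hup := updO_noop p (sq, (niz.drop k).take (j0' + 1 - k))
              (by show sq ≤ p.1; omega)
            rw [hup]
            exact Or.inr ⟨k0, j0, rfl, h2, h3, fun k' hk' => h4 k' (List.mem_cons_of_mem _ hk')⟩

theorem B_eq_core (niz : List Int) :
    ponavljajuca_sekvenca_alt niz = ((core niz).2, (core niz).1) := by
  show (match (occDict niz).items.foldl stepB none with
    | none => ([], 1)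
    | some (i, j, sq) => (PySem.List.slice niz (some i) (some (j + 1)), sq)) = _
  rw [occDict_items]
  unfold itemsSpec
  rw [show (fun k : Nat => ((niz.getD k 0 : Int), ((k : Int),
      (e2 niz k).map (fun t : Nat => (t : Int))))) = entryOf niz from rfl]
  rw [List.foldl_map]
  have hrel := selB niz ((List.range niz.length).filter (firstOcc niz)) none (1, [])
    (fun k hk => List.mem_range.mp (List.mem_filter.mp hk).1)
    (List.Pairwise.filter _ List.pairwise_lt_range)
    (Or.inl ⟨rfl, rfl⟩)
  unfold core
  rcases hrel with ⟨hb, hp⟩ | ⟨k0, j0, h1, h2, h3, -⟩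
  · rw [hb, hp]
  · rw [h1]
    have hslice : PySem.List.slice niz (some (k0 : Int)) (some ((j0 : Int) + 1)) =
        (niz.drop k0).take (j0 + 1 - k0) := by
      have : ((j0 : Int) + 1) = ((j0 + 1 : Nat) : Int) := by push_cast; ring
      rw [this, PySem.List.slice_natCast]
    dsimp only
    rw [hslice, ← h2]

-- ===== VERDICT (by name: the statement is the Claim_ definition above) =====
theorem ponavljajuca_sekvenca_spec : Claim_equal_ponavljajuca_sekvenca := by
  intro niz _
  unfold Spec_ponavljajuca_sekvenca
  rw [A_eq_core, B_eq_core]
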